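-- pv_equiv track=rewrite | github.com/rkdwlgus585-glitch/main | scripts/generate_permit_thinking_prompt_bundle_packet.py | _doc_section_map
-- ===== SOURCE A (Python) =====
-- from typing import Any, Dict, List
--
-- def _doc_section_map(text: str) -> Dict[str, List[str]]:
--     sections: Dict[str, List[str]] = {}
--     current_key = ""
--     for raw_line in str(text or "").splitlines():
--         line = raw_line.rstrip()
--         stripped = line.strip()
--         if stripped.startswith("##"):
--             current_key = stripped.lstrip("#").strip()
--             if current_key and current_key not in sections:
--                 sections[current_key] = []
--             continue
--         if current_key and stripped:
--             sections.setdefault(current_key, []).append(stripped)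
--     return sections
-- ===== SOURCE B (Python) =====
-- def _doc_section_map(text):
--     # Segment-based rewrite: strip all lines once, skip the preamble before the
--     # first "##" header, then walk header-delimited segments, merging each
--     # segment's non-empty lines into its key's bucket (empty keys are dropped).
--     lines = [ln.strip() for ln in str(text or "").splitlines()]
--     n = len(lines)
--     i = 0
--     while i < n and not lines[i].startswith("##"):
--         i += 1
--     sections = {}
--     while i < n:
--         key = lines[i].lstrip("#").strip()
--         j = i + 1
--         body = []
--         while j < n and not lines[j].startswith("##"):
--             if lines[j]:
--                 body.append(lines[j])
--             j += 1
--         if key: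
--             if key in sections:
--                 sections[key].extend(body)
--             else:
--                 sections[key] = body
--         i = j
--     return sections
-- ===== Notes on version B (the rewrite author's own statement) =====
-- stated objective: alternative
-- what changed: Replaces the single line-by-line pass with current_key state and per-line dict mutation by a segment decomposition: skip the pre-header preamble, then an outer loop over header-delimited segments with an inner scan that collects the segment's non-empty stripped lines, merging each segment's body into its key's bucket in one dict operation per segment.
import Mathlib
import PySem

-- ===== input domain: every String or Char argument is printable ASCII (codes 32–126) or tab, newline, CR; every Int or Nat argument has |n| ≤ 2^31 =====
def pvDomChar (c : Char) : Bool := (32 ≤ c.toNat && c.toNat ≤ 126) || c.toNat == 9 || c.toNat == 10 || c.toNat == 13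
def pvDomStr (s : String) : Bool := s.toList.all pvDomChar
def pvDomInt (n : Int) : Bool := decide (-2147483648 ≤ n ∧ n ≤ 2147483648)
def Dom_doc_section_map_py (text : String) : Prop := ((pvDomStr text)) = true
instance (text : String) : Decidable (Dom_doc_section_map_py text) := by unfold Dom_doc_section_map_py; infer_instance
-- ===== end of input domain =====

-- B replaces A's single stateful line-by-line pass by a segment decomposition (skip the
-- preamble, then per header-delimited segment collect the body and merge it in one dict
-- operation); objective: alternative structure, same O(n) cost.

-- ===== PORT A =====

-- s.lstrip("#"): drop the leading '#' characters; hand port (PySem has only two-sided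
-- stripChars), exact since lstrip with a one-char set is dropWhile on that char.
def pyLstripHash (s : String) : String := String.ofList (s.toList.dropWhile (fun c => c == '#'))

-- the body of A's for-loop, state = (sections, current_key)
def aStep (st : PySem.Dict String (List String) × String) (raw_line : String) :
    PySem.Dict String (List String) × String :=
  let line := PySem.Str.rstrip raw_line
  let stripped := PySem.Str.strip line
  if PySem.Str.startswith stripped "##" then
    let ck := PySem.Str.strip (pyLstripHash stripped)
    (if ck ≠ "" ∧ st.1.contains ck = false then st.1.insert ck [] else st.1, ck)
  else if st.2 ≠ "" ∧ stripped ≠ "" then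
    (st.1.modify st.2 [] (· ++ [stripped]), st.2)
  else st

def doc_section_map_py (text : String) : List (String × List String) :=
  ((PySem.Str.splitlines (if text == "" then "" else text)).foldl aStep
    (PySem.Dict.empty, "")).1.items

-- ===== PORT B =====

-- first while loop: advance i past the preamble to the first "##" header
def bSkip (lines : List String) (i : Nat) : Nat :=
  if h : i < lines.length then
    if PySem.Str.startswith lines[i] "##" then i
    else bSkip lines (i + 1)
  else i
termination_by lines.length - i

-- inner while loop: collect the segment body (non-empty lines) until the next header
def bBody (lines : List String) (j : Nat) (body : List String) : Nat × List String :=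
  if h : j < lines.length then
    if PySem.Str.startswith lines[j] "##" then (j, body)
    else bBody lines (j + 1) (if lines[j] ≠ "" then body ++ [lines[j]] else body)
  else (j, body)
termination_by lines.length - j

theorem bBody_ge (lines : List String) (j : Nat) (body : List String) :
    j ≤ (bBody lines j body).1 := by
  fun_induction bBody <;> first | (simp_all; omega) | simp_all

-- outer while loop over the header-delimited segments
def bMain (lines : List String) (i : Nat) (d : PySem.Dict String (List String)) :
    PySem.Dict String (List String) :=
  if h : i < lines.length then
    let key := PySem.Str.strip (pyLstripHash lines[i])
    let r := bBody lines (i + 1) []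
    let d' := if key ≠ "" then
        (if d.contains key then d.modify key [] (· ++ r.2) else d.insert key r.2)
      else d
    bMain lines r.1 d'
  else d
termination_by lines.length - i
decreasing_by
  have := bBody_ge lines (i + 1) []
  omega

def doc_section_map_py_alt (text : String) : List (String × List String) :=
  let lines := (PySem.Str.splitlines (if text == "" then "" else text)).map PySem.Str.strip
  (bMain lines (bSkip lines 0) PySem.Dict.empty).items

-- ===== PRECONDITION & SPEC =====
def Spec_doc_section_map_py (text : String) (out : List (String × List String)) : Prop := out = doc_section_map_py_alt text
instance (text : String) (out : List (String × List String)) : Decidable (Spec_doc_section_map_py text out) := by unfold Spec_doc_section_map_py; infer_instance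

-- ===== CLAIM (what is proved, stated in full; the proofs are below) =====
def Claim_equal_doc_section_map_py : Prop := ∀ (text : String), Dom_doc_section_map_py text → Spec_doc_section_map_py text (doc_section_map_py text)

-- ===== LEMMAS AND PROOFS =====

-- A's loop body on an already-stripped line (proof-only reformulation)
def gStep (st : PySem.Dict String (List String) × String) (s : String) :
    PySem.Dict String (List String) × String :=
  if PySem.Str.startswith s "##" then
    let ck := PySem.Str.strip (pyLstripHash s)
    (if ck ≠ "" ∧ st.1.contains ck = false then st.1.insert ck [] else st.1, ck)
  else if st.2 ≠ "" ∧ s ≠ "" then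
    (st.1.modify st.2 [] (· ++ [s]), st.2)
  else st

-- list-level reformulation of B's segment loop (proof-only)
def altGo : List String → PySem.Dict String (List String) → PySem.Dict String (List String)
  | [], d => d
  | s :: rest, d =>
      let key := PySem.Str.strip (pyLstripHash s)
      let body := (rest.takeWhile (fun t => !PySem.Str.startswith t "##")).filter (fun t => t ≠ "")
      let d' := if key ≠ "" then
          (if d.contains key then d.modify key [] (· ++ body) else d.insert key body)
        else d
      altGo (rest.dropWhile (fun t => !PySem.Str.startswith t "##")) d'
termination_by L => L.length
decreasing_by
  have := List.length_dropWhile_le (fun t => !PySem.Str.startswith t "##") rest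
  simp only [List.length_cons]
  omega

-- ---- string lemmas: strip ∘ rstrip = strip ----

theorem dropWhile_idem {α : Type} (p : α → Bool) (l : List α) :
    (l.dropWhile p).dropWhile p = l.dropWhile p := by
  induction l with
  | nil => simp
  | cons a t ih => by_cases h : p a <;> simp [List.dropWhile_cons, h, ih]

theorem lstrip_rstrip_comm (l : List Char) :
    PySem.Chars.lstrip (PySem.Chars.rstrip l) = PySem.Chars.rstrip (PySem.Chars.lstrip l) := by
  induction l with
  | nil => simp [PySem.Chars.lstrip, PySem.Chars.rstrip]
  | cons c t ih =>
    by_cases hc : PySem.Chars.isspace c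
    · by_cases he : (t.reverse.dropWhile PySem.Chars.isspace).isEmpty
      · have ht : PySem.Chars.rstrip t = [] := by
          simp [PySem.Chars.rstrip, List.isEmpty_iff.mp he]
        have h2 : PySem.Chars.rstrip (PySem.Chars.lstrip t) = [] := by
          rw [← ih, ht]; simp [PySem.Chars.lstrip]
        have h1 : PySem.Chars.rstrip (c :: t) = [] := by
          simp [PySem.Chars.rstrip, List.dropWhile_append, he, hc]
        rw [h1]
        simp [PySem.Chars.lstrip, List.dropWhile_cons, hc]
        simpa [PySem.Chars.lstrip] using h2
      · have h1 : PySem.Chars.rstrip (c :: t) = c :: PySem.Chars.rstrip t := by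
          simp [PySem.Chars.rstrip, List.dropWhile_append, he]
        rw [h1]
        simp [PySem.Chars.lstrip, List.dropWhile_cons, hc] at ih ⊢
        exact ih
    · have hl : PySem.Chars.lstrip (c :: t) = c :: t := by
        simp [PySem.Chars.lstrip, List.dropWhile_cons, hc]
      rw [hl]
      by_cases he : (t.reverse.dropWhile PySem.Chars.isspace).isEmpty
      · have h1 : PySem.Chars.rstrip (c :: t) = [c] := by
          simp [PySem.Chars.rstrip, List.dropWhile_append, he, List.dropWhile_cons, hc]
        rw [h1]
        simp [PySem.Chars.lstrip, List.dropWhile_cons, hc]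
      · have h1 : PySem.Chars.rstrip (c :: t) = c :: PySem.Chars.rstrip t := by
          simp [PySem.Chars.rstrip, List.dropWhile_append, he]
        rw [h1]
        simp [PySem.Chars.lstrip, List.dropWhile_cons, hc]

theorem rstrip_idem (l : List Char) :
    PySem.Chars.rstrip (PySem.Chars.rstrip l) = PySem.Chars.rstrip l := by
  simp [PySem.Chars.rstrip, dropWhile_idem]

theorem strip_rstrip (s : String) : PySem.Str.strip (PySem.Str.rstrip s) = PySem.Str.strip s := by
  simp only [PySem.Str.strip, PySem.Str.rstrip, PySem.Chars.strip, String.toList_ofList]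
  rw [lstrip_rstrip_comm, rstrip_idem]

theorem aStep_eq_gStep (st : PySem.Dict String (List String) × String) (raw : String) :
    aStep st raw = gStep st (PySem.Str.strip raw) := by
  simp only [aStep, gStep, strip_rstrip]

-- ---- dict lemmas ----

theorem nodup_insert {d : PySem.Dict String (List String)} {k : String} (v : List String)
    (h : d.keys.Nodup) : (d.insert k v).keys.Nodup := by
  simpa using PySem.Dict.nodup_keys_foldl_insert [k] (fun _ _ => v) d h

theorem list_replace_self (l : List (String × List String)) (k : String) (v0 : List String)
    (hnd : (l.map Prod.fst).Nodup) (hc : l.any (fun p => p.1 == k) = true) :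
    l.map (fun p => if p.1 == k then
        (k, (Option.map Prod.snd (l.find? (fun p => p.1 == k))).getD v0) else p) = l := by
  induction l with
  | nil => simp at hc
  | cons a t ih =>
    by_cases ha : (a.1 == k) = true
    · have hak : a.1 = k := by simpa using ha
      have hnk : ∀ p ∈ t, ¬(p.1 == k) = true := by
        intro p hp hpk
        have hk : k ∈ t.map Prod.fst :=
          List.mem_map.mpr ⟨p, hp, by simpa using hpk⟩
        simp only [List.map_cons, List.nodup_cons, hak] at hnd
        exact hnd.1 hk
      have hmap : t.map (fun p => if (p.1 == k) = true then (k, a.2) else p) = t :=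
        (List.map_congr_left (fun p hp => by simp [hnk p hp])).trans (List.map_id t)
      simp only [List.map_cons, List.find?_cons, ha, cond_true, if_pos ha, Option.map_some,
        Option.getD_some, hmap]
      rw [← hak]
      simp
    · have hct : t.any (fun p => p.1 == k) = true := by simpa [ha] using hc
      have hnd' : (t.map Prod.fst).Nodup := by
        simp only [List.map_cons, List.nodup_cons] at hnd; exact hnd.2
      simp only [List.map_cons, List.find?_cons, ha, cond_false, if_neg ha, ih hnd' hct]
      simp

theorem insert_getD_self {d : PySem.Dict String (List String)} {k : String} (v0 : List String)
    (hnd : d.keys.Nodup) (hc : d.contains k = true) : d.insert k (d.getD k v0) = d := by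
  obtain ⟨l⟩ := d
  apply PySem.Dict.ext
  simp only [PySem.Dict.insert, PySem.Dict.getD, PySem.Dict.get?, PySem.Dict.contains] at *
  rw [if_pos hc]
  exact list_replace_self l k v0 hnd hc

theorem modify_nil_append {d : PySem.Dict String (List String)} {k : String}
    (hnd : d.keys.Nodup) (hc : d.contains k = true) :
    d.modify k [] (· ++ []) = d := by
  simp only [PySem.Dict.modify, List.append_nil]
  exact insert_getD_self [] hnd hc

theorem insert_modify (d : PySem.Dict String (List String)) (k : String) (body : List String) :
    (d.insert k []).modify k [] (· ++ body) = d.insert k body := by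
  simp [PySem.Dict.modify, PySem.Dict.getD_insert_self, PySem.Dict.insert_insert_self]

theorem modify_modify (d : PySem.Dict String (List String)) (k : String) (f g : List String → List String) :
    (d.modify k [] f).modify k [] g = d.modify k [] (fun v => g (f v)) := by
  simp [PySem.Dict.modify, PySem.Dict.getD_insert_self, PySem.Dict.insert_insert_self]

theorem contains_modify_self (d : PySem.Dict String (List String)) (k : String) (f : List String → List String) :
    (d.modify k [] f).contains k = true := by
  simp [PySem.Dict.modify, PySem.Dict.contains_insert]

theorem nodup_modify {d : PySem.Dict String (List String)} {k : String} (f : List String → List String)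
    (h : d.keys.Nodup) : (d.modify k [] f).keys.Nodup := by
  simp only [PySem.Dict.modify]
  exact nodup_insert _ h

-- ---- the core correspondence: A's fold = segment processing ----

theorem altGo_cons (st : String) (rest : List String) (d : PySem.Dict String (List String)) :
    altGo (st :: rest) d =
      altGo (rest.dropWhile (fun t => !PySem.Str.startswith t "##"))
        (if PySem.Str.strip (pyLstripHash st) ≠ "" then
          (if d.contains (PySem.Str.strip (pyLstripHash st)) then
            d.modify (PySem.Str.strip (pyLstripHash st)) []
              (· ++ (rest.takeWhile (fun t => !PySem.Str.startswith t "##")).filter (fun t => t ≠ ""))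
          else d.insert (PySem.Str.strip (pyLstripHash st))
            ((rest.takeWhile (fun t => !PySem.Str.startswith t "##")).filter (fun t => t ≠ "")))
        else d) := by
  rw [altGo]

theorem PQ (L : List String) :
    (∀ d : PySem.Dict String (List String), d.keys.Nodup →
      (L.foldl gStep (d, "")).1 = altGo (L.dropWhile (fun t => !PySem.Str.startswith t "##")) d)
    ∧ (∀ (d : PySem.Dict String (List String)) (k : String), d.keys.Nodup → k ≠ "" →
        d.contains k = true →
      (L.foldl gStep (d, k)).1 = altGo (L.dropWhile (fun t => !PySem.Str.startswith t "##"))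
        (d.modify k [] (· ++ (L.takeWhile (fun t => !PySem.Str.startswith t "##")).filter (fun t => t ≠ "")))) := by
  induction L with
  | nil =>
    constructor
    · intro d hnd
      simp [altGo]
    · intro d k hnd hk hc
      simp only [List.foldl_nil, List.dropWhile_nil, List.takeWhile_nil, List.filter_nil, altGo]
      exact (modify_nil_append hnd hc).symm
  | cons s rest ih =>
    by_cases hs : PySem.Str.startswith s "##" = true
    · -- s is a header line
      have hp : (!PySem.Str.startswith s "##") = false := by rw [hs]; rfl
      have hdw : (s :: rest).dropWhile (fun t => !PySem.Str.startswith t "##") = s :: rest := by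
        rw [List.dropWhile_cons, hp]; simp
      have htw : (s :: rest).takeWhile (fun t => !PySem.Str.startswith t "##") = [] := by
        rw [List.takeWhile_cons, hp]; simp
      have H : ∀ (d : PySem.Dict String (List String)) (k0 : String), d.keys.Nodup →
          ((s :: rest).foldl gStep (d, k0)).1 = altGo (s :: rest) d := by
        intro d k0 hnd
        rw [List.foldl_cons, altGo_cons]
        by_cases hk : PySem.Str.strip (pyLstripHash s) = ""
        · have hg : gStep (d, k0) s = (d, PySem.Str.strip (pyLstripHash s)) := by
            simp only [gStep, hs]
            simp [hk]
          rw [hg, if_neg (by simp [hk])]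
          rw [hk]
          exact ih.1 d hnd
        · rw [if_pos hk]
          cases hcont : d.contains (PySem.Str.strip (pyLstripHash s)) with
          | true =>
            have hg : gStep (d, k0) s = (d, PySem.Str.strip (pyLstripHash s)) := by
              simp only [gStep, hs]
              simp [hcont]
            rw [hg]
            rw [if_pos rfl]
            exact ih.2 d _ hnd hk hcont
          | false =>
            have hg : gStep (d, k0) s =
                (d.insert (PySem.Str.strip (pyLstripHash s)) [], PySem.Str.strip (pyLstripHash s)) := by
              simp only [gStep, hs]
              simp [hcont, hk]
            rw [hg]
            have hcont' : (d.insert (PySem.Str.strip (pyLstripHash s)) []).contains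
                (PySem.Str.strip (pyLstripHash s)) = true := by
              simp [PySem.Dict.contains_insert]
            rw [ih.2 _ _ (nodup_insert _ hnd) hk hcont', insert_modify]
            simp
      constructor
      · intro d hnd
        rw [hdw]
        exact H d "" hnd
      · intro d k hnd hk hc
        rw [hdw, htw, List.filter_nil, modify_nil_append hnd hc]
        exact H d k hnd
    · -- s is not a header line
      have hb : PySem.Str.startswith s "##" = false := by simpa using hs
      have hp : (!PySem.Str.startswith s "##") = true := by rw [hb]; rfl
      have hdw : (s :: rest).dropWhile (fun t => !PySem.Str.startswith t "##") =
          rest.dropWhile (fun t => !PySem.Str.startswith t "##") := by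
        rw [List.dropWhile_cons, hp]; simp
      have htw : (s :: rest).takeWhile (fun t => !PySem.Str.startswith t "##") =
          s :: rest.takeWhile (fun t => !PySem.Str.startswith t "##") := by
        rw [List.takeWhile_cons, hp]; simp
      constructor
      · intro d hnd
        have hg : gStep (d, "") s = (d, "") := by
          simp only [gStep]
          rw [if_neg hs, if_neg (by simp)]
        rw [List.foldl_cons, hg, hdw]
        exact ih.1 d hnd
      · intro d k hnd hk hc
        rw [List.foldl_cons, hdw, htw]
        by_cases hz : s = ""
        · have hg : gStep (d, k) s = (d, k) := by
            simp only [gStep]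
            rw [if_neg hs, if_neg (by simp [hz])]
          rw [hg]
          have hf : (s :: rest.takeWhile (fun t => !PySem.Str.startswith t "##")).filter
              (fun t => t ≠ "") =
              (rest.takeWhile (fun t => !PySem.Str.startswith t "##")).filter (fun t => t ≠ "") := by
            simp [List.filter_cons, hz]
          rw [hf]
          exact ih.2 d k hnd hk hc
        · have hg : gStep (d, k) s = (d.modify k [] (· ++ [s]), k) := by
            simp only [gStep]
            rw [if_neg hs, if_pos ⟨hk, hz⟩]
          rw [hg]
          rw [ih.2 (d.modify k [] (· ++ [s])) k (nodup_modify _ hnd) hk (contains_modify_self d k _)]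
          rw [modify_modify]
          have hf : (s :: rest.takeWhile (fun t => !PySem.Str.startswith t "##")).filter
              (fun t => t ≠ "") =
              s :: (rest.takeWhile (fun t => !PySem.Str.startswith t "##")).filter (fun t => t ≠ "") := by
            simp [List.filter_cons, hz]
          rw [hf]
          have hfun : (fun v : List String => v ++ [s] ++
              (rest.takeWhile (fun t => !PySem.Str.startswith t "##")).filter (fun t => t ≠ "")) =
              (fun v : List String => v ++ s ::
              (rest.takeWhile (fun t => !PySem.Str.startswith t "##")).filter (fun t => t ≠ "")) := by
            funext v
            simp
          rw [hfun]

-- ---- bridging B's index loops to the list-level segment loop ----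

theorem dropWhile_eq_drop {α : Type} (p : α → Bool) (l : List α) :
    l.dropWhile p = l.drop (l.takeWhile p).length := by
  induction l with
  | nil => simp
  | cons a t ih => by_cases h : p a <;> simp [List.dropWhile_cons, List.takeWhile_cons, h, ih]

theorem bSkip_drop (lines : List String) (i : Nat) :
    lines.drop (bSkip lines i) = (lines.drop i).dropWhile (fun t => !PySem.Str.startswith t "##") := by
  fun_induction bSkip lines i with
  | case1 i h hh =>
    have hp : (!PySem.Str.startswith lines[i] "##") = false := by rw [hh]; rfl
    rw [List.drop_eq_getElem_cons h, List.dropWhile_cons, hp]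
    simp
  | case2 i h hh ih =>
    have hb : PySem.Str.startswith lines[i] "##" = false := by simpa using hh
    have hp : (!PySem.Str.startswith lines[i] "##") = true := by rw [hb]; rfl
    rw [ih, List.drop_eq_getElem_cons h, List.dropWhile_cons, hp]
    simp
  | case3 i h =>
    rw [List.drop_eq_nil_of_le (by omega)]
    simp

theorem bBody_spec (lines : List String) (j : Nat) (acc : List String) :
    bBody lines j acc =
      (j + ((lines.drop j).takeWhile (fun t => !PySem.Str.startswith t "##")).length,
       acc ++ ((lines.drop j).takeWhile (fun t => !PySem.Str.startswith t "##")).filter (fun t => t ≠ "")) := by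
  fun_induction bBody lines j acc with
  | case1 j acc h hh =>
    have hp : (!PySem.Str.startswith lines[j] "##") = false := by rw [hh]; rfl
    rw [List.drop_eq_getElem_cons h, List.takeWhile_cons, hp]
    simp
  | case2 j acc h hh ih =>
    have hb : PySem.Str.startswith lines[j] "##" = false := by simpa using hh
    have hp : (!PySem.Str.startswith lines[j] "##") = true := by rw [hb]; rfl
    simp only [dite_eq_ite] at ih
    rw [ih, List.drop_eq_getElem_cons h, List.takeWhile_cons, hp]
    by_cases hz : lines[j] = "" <;>
      simp [List.filter_cons, hz] <;> omega
  | case3 j acc h =>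
    rw [List.drop_eq_nil_of_le (by omega)]
    simp

theorem bMain_eq_altGo_aux (n : Nat) : ∀ (lines : List String) (i : Nat)
    (d : PySem.Dict String (List String)), lines.length - i ≤ n →
    bMain lines i d = altGo (lines.drop i) d := by
  induction n with
  | zero =>
    intro lines i d hn
    have h : ¬ i < lines.length := by omega
    rw [bMain, dif_neg h, List.drop_eq_nil_of_le (by omega), altGo]
  | succ n ih =>
    intro lines i d hn
    by_cases h : i < lines.length
    · rw [bMain, dif_pos h]
      simp only [bBody_spec, List.nil_append]
      rw [ih lines _ _ (by omega)]
      rw [List.drop_eq_getElem_cons h, altGo]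
      have hdrop : lines.drop (i + 1 +
          ((lines.drop (i+1)).takeWhile (fun t => !PySem.Str.startswith t "##")).length) =
          (lines.drop (i+1)).dropWhile (fun t => !PySem.Str.startswith t "##") := by
        rw [dropWhile_eq_drop, ← List.drop_drop]
      rw [hdrop]
    · rw [bMain, dif_neg h, List.drop_eq_nil_of_le (by omega), altGo]

theorem bMain_eq_altGo (lines : List String) (i : Nat) (d : PySem.Dict String (List String)) :
    bMain lines i d = altGo (lines.drop i) d :=
  bMain_eq_altGo_aux (lines.length - i) lines i d (le_refl _)

-- ===== VERDICT (by name: the statement is the Claim_ definition above) =====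
theorem doc_section_map_py_spec : Claim_equal_doc_section_map_py := by
  intro text _
  unfold Spec_doc_section_map_py doc_section_map_py doc_section_map_py_alt
  have hstep : aStep = fun st raw => gStep st (PySem.Str.strip raw) :=
    funext fun st => funext fun raw => aStep_eq_gStep st raw
  rw [hstep, ← List.foldl_map]
  rw [(PQ _).1 PySem.Dict.empty (by simp [PySem.Dict.empty, PySem.Dict.keys])]
  simp only [bMain_eq_altGo, bSkip_drop, List.drop_zero]
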